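-- pv_equiv track=rewrite | github.com/EarlTheDuke/Players-of-Games | chess_board_renderer.py | format_captured_pieces
-- ===== SOURCE A (Python) =====
-- PIECE_SYMBOLS = {
--     'K': '♔', 'Q': '♕', 'R': '♖', 'B': '♗', 'N': '♘', 'P': '♙',  # White pieces
--     'k': '♚', 'q': '♛', 'r': '♜', 'b': '♝', 'n': '♞', 'p': '♟'   # Black pieces
-- }
--
-- def format_captured_pieces(pieces_list):
--     """
--     Format a list of captured pieces as Unicode symbols.
--
--     Args:
--         pieces_list: List of piece symbols (e.g., ['P', 'N', 'q'])
--
--     Returns: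
--         String of Unicode piece symbols
--     """
--     if not pieces_list:
--         return "—"
--
--     # Sort pieces by value (most valuable first)
--     piece_order = {'Q': 0, 'q': 0, 'R': 1, 'r': 1, 'B': 2, 'b': 2, 'N': 3, 'n': 3, 'P': 4, 'p': 4}
--     sorted_pieces = sorted(pieces_list, key=lambda x: piece_order.get(x, 5))
--
--     # Convert to Unicode symbols
--     symbols = []
--     for piece in sorted_pieces:
--         if piece.isupper():
--             symbols.append(PIECE_SYMBOLS[piece])
--         else:
--             symbols.append(PIECE_SYMBOLS[piece])
--
--     return ''.join(symbols)
-- ===== SOURCE B (Python) =====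
-- PIECE_SYMBOLS = {
--     'K': '♔', 'Q': '♕', 'R': '♖', 'B': '♗', 'N': '♘', 'P': '♙',
--     'k': '♚', 'q': '♛', 'r': '♜', 'b': '♝', 'n': '♞', 'p': '♟'
-- }
--
-- _PIECE_ORDER = {'Q': 0, 'q': 0, 'R': 1, 'r': 1, 'B': 2, 'b': 2,
--                 'N': 3, 'n': 3, 'P': 4, 'p': 4}
--
--
-- def format_captured_pieces(pieces_list):
--     if not pieces_list:
--         return "—"
--     # Bucket sort by rank: one pass, stable within each rank by construction.
--     buckets = [[], [], [], [], [], []]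
--     for piece in pieces_list:
--         buckets[_PIECE_ORDER.get(piece, 5)].append(piece)
--     return ''.join(PIECE_SYMBOLS[p] for b in buckets for p in b)
-- ===== Notes on version B (the rewrite author's own statement) =====
-- stated objective: alternative
-- what changed: Replaces sorted() with a comparison key by a single-pass six-bucket counting sort (append each piece to its rank's bucket, then concatenate buckets in rank order), preserving stability by construction.
import Mathlib
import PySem

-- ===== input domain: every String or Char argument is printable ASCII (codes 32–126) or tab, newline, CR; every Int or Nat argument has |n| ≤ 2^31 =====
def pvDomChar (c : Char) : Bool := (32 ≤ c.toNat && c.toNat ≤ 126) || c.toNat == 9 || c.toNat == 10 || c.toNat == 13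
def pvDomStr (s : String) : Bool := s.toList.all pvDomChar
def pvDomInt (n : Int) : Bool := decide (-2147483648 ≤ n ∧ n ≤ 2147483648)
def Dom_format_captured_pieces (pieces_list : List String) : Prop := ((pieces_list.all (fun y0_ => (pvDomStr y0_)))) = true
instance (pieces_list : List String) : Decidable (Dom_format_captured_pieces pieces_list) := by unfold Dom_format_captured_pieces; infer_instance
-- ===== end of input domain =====

-- B replaces A's comparison sort by a one-pass six-bucket (counting-style) sort; same output, simpler mechanism.

-- ===== PORT A =====
-- module constant PIECE_SYMBOLS (shared by both Pythons)
def pvPieceSymbols : PySem.Dict String String :=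
  PySem.Dict.ofList [("K","♔"),("Q","♕"),("R","♖"),("B","♗"),("N","♘"),("P","♙"),
                     ("k","♚"),("q","♛"),("r","♜"),("b","♝"),("n","♞"),("p","♟")]

-- piece.isupper(), ported by hand: at least one cased character and no lowercase one
-- (exact on the ASCII domain, where the cased characters are exactly A-Z and a-z)
def pvIsupper (s : String) : Bool :=
  s.toList.any PySem.Chars.isupper && s.toList.all (fun c => !PySem.Chars.islower c)

-- local dict piece_order in A (= module constant _PIECE_ORDER in B)
def pvPieceOrder : PySem.Dict String Int :=
  PySem.Dict.ofList [("Q",0),("q",0),("R",1),("r",1),("B",2),("b",2),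
                     ("N",3),("n",3),("P",4),("p",4)]

-- PIECE_SYMBOLS[piece] raises KeyError for unknown pieces; such inputs are outside
-- Pre_; getD with "" stands in for the raising lookup there.
def format_captured_pieces (pieces_list : List String) : String :=
  if pieces_list = [] then "—"
  else
    let sorted_pieces :=
      PySem.List.sorted pieces_list (fun x => PySem.Dict.getD pvPieceOrder x 5) false
    let symbols := sorted_pieces.foldl (fun acc piece =>
      if pvIsupper piece then acc ++ [PySem.Dict.getD pvPieceSymbols piece ""]
      else acc ++ [PySem.Dict.getD pvPieceSymbols piece ""]) ([] : List String)
    PySem.Str.join "" symbols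

-- ===== PORT B =====
-- the six buckets of Source B, one per rank 0..5
structure PvBuckets where
  b0 : List String
  b1 : List String
  b2 : List String
  b3 : List String
  b4 : List String
  b5 : List String
deriving Repr, DecidableEq

-- buckets[_PIECE_ORDER.get(piece, 5)].append(piece)
def pvBucketStep (b : PvBuckets) (piece : String) : PvBuckets :=
  let r := PySem.Dict.getD pvPieceOrder piece 5
  if r = 0 then { b with b0 := b.b0 ++ [piece] }
  else if r = 1 then { b with b1 := b.b1 ++ [piece] }
  else if r = 2 then { b with b2 := b.b2 ++ [piece] }
  else if r = 3 then { b with b3 := b.b3 ++ [piece] }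
  else if r = 4 then { b with b4 := b.b4 ++ [piece] }
  else { b with b5 := b.b5 ++ [piece] }

def format_captured_pieces_alt (pieces_list : List String) : String :=
  if pieces_list = [] then "—"
  else
    let bs := pieces_list.foldl pvBucketStep ⟨[], [], [], [], [], []⟩
    PySem.Str.join ""
      ((bs.b0 ++ bs.b1 ++ bs.b2 ++ bs.b3 ++ bs.b4 ++ bs.b5).map
        (fun p => PySem.Dict.getD pvPieceSymbols p ""))

-- ===== PRECONDITION & SPEC =====
-- Pre_ excludes exactly the inputs containing a string that is not one of the 12
-- piece symbols: there the Python A raises KeyError (PIECE_SYMBOLS[piece]).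
def Pre_format_captured_pieces (pieces_list : List String) : Prop :=
  ∀ p ∈ pieces_list, p ∈ ["K","Q","R","B","N","P","k","q","r","b","n","p"]
instance (pieces_list : List String) : Decidable (Pre_format_captured_pieces pieces_list) := by
  unfold Pre_format_captured_pieces; infer_instance

def pvWitness_format_captured_pieces : List String := ["P", "q", "N", "q"]

def Spec_format_captured_pieces (pieces_list : List String) (out : String) : Prop :=
  out = format_captured_pieces_alt pieces_list
instance (pieces_list : List String) (out : String) : Decidable (Spec_format_captured_pieces pieces_list out) := by
  unfold Spec_format_captured_pieces; infer_instance

-- ===== CLAIM (what is proved, stated in full; the proofs are below) =====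
def Claim_equal_format_captured_pieces : Prop := ∀ (pieces_list : List String), Dom_format_captured_pieces pieces_list → Pre_format_captured_pieces pieces_list → Spec_format_captured_pieces pieces_list (format_captured_pieces pieces_list)

-- ===== LEMMAS AND PROOFS =====

-- the sort key of A
def pvRank (s : String) : Int := PySem.Dict.getD pvPieceOrder s 5

def pvCat (b : PvBuckets) : List String :=
  b.b0 ++ b.b1 ++ b.b2 ++ b.b3 ++ b.b4 ++ b.b5

lemma pvRank_cases (s : String) :
    pvRank s = 0 ∨ pvRank s = 1 ∨ pvRank s = 2 ∨ pvRank s = 3 ∨ pvRank s = 4 ∨ pvRank s = 5 := by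
  unfold pvRank pvPieceOrder
  simp [PySem.Dict.ofList, PySem.Dict.update, PySem.Dict.getD_insert, PySem.Dict.getD_empty]
  split_ifs <;> simp_all

lemma pvInsertBy_append (before : String → String → Bool) (x : String) (l t : List String)
    (h : ∀ y ∈ l, before x y = false) :
    PySem.List.insertBy before x (l ++ t) = l ++ PySem.List.insertBy before x t := by
  induction l with
  | nil => simp
  | cons y ys ih =>
    have hy := h y (by simp)
    simp only [List.cons_append, PySem.List.insertBy, hy, Bool.false_eq_true, if_false]
    rw [ih (fun z hz => h z (by simp [hz]))]

lemma pvInsertBy_all (before : String → String → Bool) (x : String) (t : List String)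
    (h : ∀ y ∈ t, before x y = true) :
    PySem.List.insertBy before x t = x :: t := by
  cases t with
  | nil => simp [PySem.List.insertBy]
  | cons y ys => simp [PySem.List.insertBy, h y (by simp)]

lemma pvIns_mid (x : String) (l t : List String) (k : Int) (hx : pvRank x = k)
    (hl : ∀ y ∈ l, pvRank y ≤ k) (ht : ∀ y ∈ t, k < pvRank y) :
    PySem.List.insertBy (fun a c => decide (pvRank a < pvRank c)) x (l ++ t) = l ++ x :: t := by
  rw [pvInsertBy_append _ _ _ _ (fun y hy => by
        simp only [decide_eq_false_iff_not, not_lt, hx]; exact hl y hy)]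
  rw [pvInsertBy_all _ _ _ (fun y hy => by
        simp only [decide_eq_true_eq, hx]; exact ht y hy)]

def pvInv (b : PvBuckets) : Prop :=
  (∀ y ∈ b.b0, pvRank y = 0) ∧ (∀ y ∈ b.b1, pvRank y = 1) ∧ (∀ y ∈ b.b2, pvRank y = 2) ∧
  (∀ y ∈ b.b3, pvRank y = 3) ∧ (∀ y ∈ b.b4, pvRank y = 4) ∧ (∀ y ∈ b.b5, pvRank y = 5)

lemma pvStep (x : String) (b : PvBuckets) (hb : pvInv b) :
    PySem.List.insertBy (fun a c => decide (pvRank a < pvRank c)) x (pvCat b)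
      = pvCat (pvBucketStep b x) ∧ pvInv (pvBucketStep b x) := by
  unfold pvInv at hb
  obtain ⟨h0, h1, h2, h3, h4, h5⟩ := hb
  have hr : PySem.Dict.getD pvPieceOrder x 5 = pvRank x := rfl
  unfold pvInv
  rcases pvRank_cases x with hk | hk | hk | hk | hk | hk
  · have hbs : pvBucketStep b x = ⟨b.b0 ++ [x], b.b1, b.b2, b.b3, b.b4, b.b5⟩ := by
      simp [pvBucketStep, hr, hk]
    rw [hbs]
    refine ⟨?_, (by intro y hy; rcases List.mem_append.mp hy with hm | hm; exact h0 y hm; (simp at hm; rw [hm]; exact hk)), (fun y hy => h1 y hy), (fun y hy => h2 y hy), (fun y hy => h3 y hy), (fun y hy => h4 y hy), (fun y hy => h5 y hy)⟩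
    rw [show pvCat b = (b.b0) ++ (b.b1 ++ b.b2 ++ b.b3 ++ b.b4 ++ b.b5) from by simp [pvCat],
        pvIns_mid x _ _ 0 hk (by intro y hy; rw [h0 y hy]; try norm_num) (by intro y hy; simp only [List.mem_append] at hy; rcases hy with (((h | h) | h) | h) | h <;> first | (rw [h1 y h]; try norm_num) | (rw [h2 y h]; try norm_num) | (rw [h3 y h]; try norm_num) | (rw [h4 y h]; try norm_num) | (rw [h5 y h]; try norm_num))]
    simp [pvCat]
  · have hbs : pvBucketStep b x = ⟨b.b0, b.b1 ++ [x], b.b2, b.b3, b.b4, b.b5⟩ := by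
      simp [pvBucketStep, hr, hk]
    rw [hbs]
    refine ⟨?_, (fun y hy => h0 y hy), (by intro y hy; rcases List.mem_append.mp hy with hm | hm; exact h1 y hm; (simp at hm; rw [hm]; exact hk)), (fun y hy => h2 y hy), (fun y hy => h3 y hy), (fun y hy => h4 y hy), (fun y hy => h5 y hy)⟩
    rw [show pvCat b = (b.b0 ++ b.b1) ++ (b.b2 ++ b.b3 ++ b.b4 ++ b.b5) from by simp [pvCat],
        pvIns_mid x _ _ 1 hk (by intro y hy; simp only [List.mem_append] at hy; rcases hy with h | h <;> first | (rw [h0 y h]; try norm_num) | (rw [h1 y h]; try norm_num)) (by intro y hy; simp only [List.mem_append] at hy; rcases hy with ((h | h) | h) | h <;> first | (rw [h2 y h]; try norm_num) | (rw [h3 y h]; try norm_num) | (rw [h4 y h]; try norm_num) | (rw [h5 y h]; try norm_num))]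
    simp [pvCat]
  · have hbs : pvBucketStep b x = ⟨b.b0, b.b1, b.b2 ++ [x], b.b3, b.b4, b.b5⟩ := by
      simp [pvBucketStep, hr, hk]
    rw [hbs]
    refine ⟨?_, (fun y hy => h0 y hy), (fun y hy => h1 y hy), (by intro y hy; rcases List.mem_append.mp hy with hm | hm; exact h2 y hm; (simp at hm; rw [hm]; exact hk)), (fun y hy => h3 y hy), (fun y hy => h4 y hy), (fun y hy => h5 y hy)⟩
    rw [show pvCat b = (b.b0 ++ b.b1 ++ b.b2) ++ (b.b3 ++ b.b4 ++ b.b5) from by simp [pvCat],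
        pvIns_mid x _ _ 2 hk (by intro y hy; simp only [List.mem_append] at hy; rcases hy with (h | h) | h <;> first | (rw [h0 y h]; try norm_num) | (rw [h1 y h]; try norm_num) | (rw [h2 y h]; try norm_num)) (by intro y hy; simp only [List.mem_append] at hy; rcases hy with (h | h) | h <;> first | (rw [h3 y h]; try norm_num) | (rw [h4 y h]; try norm_num) | (rw [h5 y h]; try norm_num))]
    simp [pvCat]
  · have hbs : pvBucketStep b x = ⟨b.b0, b.b1, b.b2, b.b3 ++ [x], b.b4, b.b5⟩ := by
      simp [pvBucketStep, hr, hk]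
    rw [hbs]
    refine ⟨?_, (fun y hy => h0 y hy), (fun y hy => h1 y hy), (fun y hy => h2 y hy), (by intro y hy; rcases List.mem_append.mp hy with hm | hm; exact h3 y hm; (simp at hm; rw [hm]; exact hk)), (fun y hy => h4 y hy), (fun y hy => h5 y hy)⟩
    rw [show pvCat b = (b.b0 ++ b.b1 ++ b.b2 ++ b.b3) ++ (b.b4 ++ b.b5) from by simp [pvCat],
        pvIns_mid x _ _ 3 hk (by intro y hy; simp only [List.mem_append] at hy; rcases hy with ((h | h) | h) | h <;> first | (rw [h0 y h]; try norm_num) | (rw [h1 y h]; try norm_num) | (rw [h2 y h]; try norm_num) | (rw [h3 y h]; try norm_num)) (by intro y hy; simp only [List.mem_append] at hy; rcases hy with h | h <;> first | (rw [h4 y h]; try norm_num) | (rw [h5 y h]; try norm_num))]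
    simp [pvCat]
  · have hbs : pvBucketStep b x = ⟨b.b0, b.b1, b.b2, b.b3, b.b4 ++ [x], b.b5⟩ := by
      simp [pvBucketStep, hr, hk]
    rw [hbs]
    refine ⟨?_, (fun y hy => h0 y hy), (fun y hy => h1 y hy), (fun y hy => h2 y hy), (fun y hy => h3 y hy), (by intro y hy; rcases List.mem_append.mp hy with hm | hm; exact h4 y hm; (simp at hm; rw [hm]; exact hk)), (fun y hy => h5 y hy)⟩
    rw [show pvCat b = (b.b0 ++ b.b1 ++ b.b2 ++ b.b3 ++ b.b4) ++ (b.b5) from by simp [pvCat],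
        pvIns_mid x _ _ 4 hk (by intro y hy; simp only [List.mem_append] at hy; rcases hy with (((h | h) | h) | h) | h <;> first | (rw [h0 y h]; try norm_num) | (rw [h1 y h]; try norm_num) | (rw [h2 y h]; try norm_num) | (rw [h3 y h]; try norm_num) | (rw [h4 y h]; try norm_num)) (by intro y hy; rw [h5 y hy]; try norm_num)]
    simp [pvCat]
  · have hbs : pvBucketStep b x = ⟨b.b0, b.b1, b.b2, b.b3, b.b4, b.b5 ++ [x]⟩ := by
      simp [pvBucketStep, hr, hk]
    rw [hbs]
    refine ⟨?_, (fun y hy => h0 y hy), (fun y hy => h1 y hy), (fun y hy => h2 y hy), (fun y hy => h3 y hy), (fun y hy => h4 y hy), (by intro y hy; rcases List.mem_append.mp hy with hm | hm; exact h5 y hm; (simp at hm; rw [hm]; exact hk))⟩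
    rw [show pvCat b = (b.b0 ++ b.b1 ++ b.b2 ++ b.b3 ++ b.b4 ++ b.b5) ++ (([] : List String)) from by simp [pvCat],
        pvIns_mid x _ _ 5 hk (by intro y hy; simp only [List.mem_append] at hy; rcases hy with ((((h | h) | h) | h) | h) | h <;> first | (rw [h0 y h]; try norm_num) | (rw [h1 y h]; try norm_num) | (rw [h2 y h]; try norm_num) | (rw [h3 y h]; try norm_num) | (rw [h4 y h]; try norm_num) | (rw [h5 y h]; try norm_num)) (by intro y hy; simp at hy)]
    simp [pvCat]

lemma pvFold_inv (xs : List String) (b : PvBuckets) (hb : pvInv b) :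
    xs.foldl (fun acc x => PySem.List.insertBy (fun a c => decide (pvRank a < pvRank c)) x acc) (pvCat b)
      = pvCat (xs.foldl pvBucketStep b) := by
  induction xs generalizing b with
  | nil => rfl
  | cons x xs ih =>
    obtain ⟨he, hi⟩ := pvStep x b hb
    simp only [List.foldl_cons, he]
    exact ih _ hi

-- ===== VERDICT (by name: the statement is the Claim_ definition above) =====
theorem format_captured_pieces_spec : Claim_equal_format_captured_pieces := by
  intro xs _ _
  unfold Spec_format_captured_pieces format_captured_pieces format_captured_pieces_alt
  by_cases hnil : xs = []
  · simp [hnil]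
  · simp only [if_neg hnil, ite_self]
    rw [PySem.List.foldl_append_singleton_eq_map]
    have hs : PySem.List.sorted xs (fun x => PySem.Dict.getD pvPieceOrder x 5) false
        = pvCat (xs.foldl pvBucketStep ⟨[], [], [], [], [], []⟩) := by
      rw [PySem.List.sorted_eq_foldl_insertBy]
      have := pvFold_inv xs ⟨[], [], [], [], [], []⟩ (by simp [pvInv])
      simpa [pvCat, pvRank] using this
    rw [hs]
    rfl
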